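-- pv_equiv track=rewrite | github.com/ManosNestoras/adaptiveNetwork-v3.0 | utils.py | check_traffic_conditions
-- ===== SOURCE A (Python) =====
-- def check_traffic_conditions(global_traffic, config):
--     """
--     Checks the traffic conditions for low and high traffic and updates the no_act flag accordingly.
--
--     Args:
--         global_traffic (list): A list of traffic volume values.
--         config (dict): Configuration dictionary with low and high traffic thresholds.
--
--     Returns:
--         dict: A dictionary containing the traffic condition flags: lowTraffic, highTraffic, and no_act.
--     """
--     # Low traffic check
--     lowTraffic = 0
--     if not global_traffic:  # If the traffic list is empty
--         lowTraffic = 1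
--     else:
--         for volume in global_traffic:
--             if volume < config["lowTraffic"]["volume"]:
--                 lowTraffic = 1
--             else:
--                 lowTraffic = 0
--
--     # Set no_act flag if low traffic is detected
--     no_act = 1 if lowTraffic == 1 else 0
--
--     # c_max threshold check
--     c_max_mode = 0
--     for volume in global_traffic:
--         if volume > config["c_max"]["volume"]:
--             c_max_mode = 1
--
--     # High traffic check
--     highTraffic = 0
--     for volume in global_traffic:
--         if volume > config["highTraffic"]["volume"]:
--             highTraffic = 1
--
--     return c_max_mode, highTraffic, no_act
-- ===== SOURCE B (Python) =====
-- def check_traffic_conditions(global_traffic, config):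
--     # Simpler: empty list is an O(1) early return; lowTraffic depends only on the
--     # last element (as in the original, whose scan lets the last iteration win);
--     # one single pass sets both c_max_mode and highTraffic.
--     if not global_traffic:
--         return 0, 0, 1
--     no_act = 1 if global_traffic[-1] < config["lowTraffic"]["volume"] else 0
--     c_thr = config["c_max"]["volume"]
--     h_thr = config["highTraffic"]["volume"]
--     c_max_mode = 0
--     highTraffic = 0
--     for volume in global_traffic:
--         if volume > c_thr:
--             c_max_mode = 1
--         if volume > h_thr:
--             highTraffic = 1
--     return c_max_mode, highTraffic, no_act
-- ===== Notes on version B (the rewrite author's own statement) =====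
-- stated objective: simpler
-- what changed: Replaces the three separate scans by an O(1) last-element check for no_act (the original low-traffic scan is last-wins) plus one single pass that sets both c_max_mode and highTraffic, with an early return for the empty list.
import Mathlib
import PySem

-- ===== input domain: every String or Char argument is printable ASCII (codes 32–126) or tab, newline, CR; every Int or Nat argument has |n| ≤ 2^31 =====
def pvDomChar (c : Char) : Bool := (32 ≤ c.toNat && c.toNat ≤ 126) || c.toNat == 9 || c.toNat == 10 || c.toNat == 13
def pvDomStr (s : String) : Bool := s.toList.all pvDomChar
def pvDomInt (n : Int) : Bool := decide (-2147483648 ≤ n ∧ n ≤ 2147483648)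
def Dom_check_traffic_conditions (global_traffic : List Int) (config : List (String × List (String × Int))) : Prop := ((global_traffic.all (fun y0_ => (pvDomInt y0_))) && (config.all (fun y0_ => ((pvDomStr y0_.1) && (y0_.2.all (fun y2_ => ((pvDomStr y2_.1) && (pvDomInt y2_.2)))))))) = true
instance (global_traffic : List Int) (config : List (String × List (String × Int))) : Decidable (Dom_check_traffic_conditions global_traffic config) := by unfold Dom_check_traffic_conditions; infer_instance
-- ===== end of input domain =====

-- B is simpler: an O(1) last-element check replaces the last-wins low-traffic scan,
-- and one single pass sets both c_max_mode and highTraffic (same return value as A).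

-- config[k]["volume"] as an optional lookup (none = KeyError in Python)
def volOf (config : List (String × List (String × Int))) (k : String) : Option Int :=
  ((PySem.Dict.mk config).get? k).bind (fun d => (PySem.Dict.mk d).get? "volume")

-- ===== PORT A =====
def check_traffic_conditions (global_traffic : List Int) (config : List (String × List (String × Int))) : Int × Int × Int :=
  let lowTraffic : Int :=
    if global_traffic = [] then 1
    else global_traffic.foldl
      (fun _ volume => if volume < (volOf config "lowTraffic").getD 0 then (1 : Int) else 0) 0
  let no_act : Int := if lowTraffic = 1 then 1 else 0
  let c_max_mode : Int := global_traffic.foldl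
    (fun s volume => if volume > (volOf config "c_max").getD 0 then (1 : Int) else s) 0
  let highTraffic : Int := global_traffic.foldl
    (fun s volume => if volume > (volOf config "highTraffic").getD 0 then (1 : Int) else s) 0
  (c_max_mode, highTraffic, no_act)

-- ===== PORT B =====
def check_traffic_conditions_alt (global_traffic : List Int) (config : List (String × List (String × Int))) : Int × Int × Int :=
  if global_traffic = [] then (0, 0, 1)
  else
    let no_act : Int :=
      if (PySem.List.pyGet? global_traffic (-1)).getD 0 < (volOf config "lowTraffic").getD 0 then 1 else 0
    let c_thr := (volOf config "c_max").getD 0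
    let h_thr := (volOf config "highTraffic").getD 0
    let p := global_traffic.foldl
      (fun (p : Int × Int) volume =>
        ((if volume > c_thr then 1 else p.1), (if volume > h_thr then 1 else p.2))) (0, 0)
    (p.1, p.2, no_act)

-- ===== PRECONDITION & SPEC =====
-- Pre_ excludes only inputs where Python A raises KeyError: a nonempty traffic list
-- with any of the three config["…"]["volume"] lookups missing.
def Pre_check_traffic_conditions (global_traffic : List Int) (config : List (String × List (String × Int))) : Prop :=
  global_traffic = [] ∨
    ((volOf config "lowTraffic").isSome ∧ (volOf config "c_max").isSome ∧ (volOf config "highTraffic").isSome)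
instance (global_traffic : List Int) (config : List (String × List (String × Int))) : Decidable (Pre_check_traffic_conditions global_traffic config) := by unfold Pre_check_traffic_conditions; infer_instance

def pvWitness_check_traffic_conditions : List Int × (List (String × List (String × Int))) :=
  ([3, 7], [("lowTraffic", [("volume", 2)]), ("c_max", [("volume", 10)]), ("highTraffic", [("volume", 5)])])

def Spec_check_traffic_conditions (global_traffic : List Int) (config : List (String × List (String × Int))) (out : Int × Int × Int) : Prop := out = check_traffic_conditions_alt global_traffic config
instance (global_traffic : List Int) (config : List (String × List (String × Int))) (out : Int × Int × Int) : Decidable (Spec_check_traffic_conditions global_traffic config out) := by unfold Spec_check_traffic_conditions; infer_instance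

-- ===== CLAIM (what is proved, stated in full; the proofs are below) =====
def Claim_equal_check_traffic_conditions : Prop := ∀ (global_traffic : List Int) (config : List (String × List (String × Int))), Dom_check_traffic_conditions global_traffic config → Pre_check_traffic_conditions global_traffic config → Spec_check_traffic_conditions global_traffic config (check_traffic_conditions global_traffic config)

-- ===== LEMMAS AND PROOFS =====

-- A's last-wins low-traffic scan equals a check of the last element.
theorem low_foldl_last (t : Int) (a x : Int) (xs : List Int) :
    (x :: xs).foldl (fun _ volume => if volume < t then (1 : Int) else 0) a
      = if (x :: xs).getLast (by simp) < t then 1 else 0 := by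
  induction xs generalizing x a with
  | nil => simp [List.foldl]
  | cons y ys ih => simpa [List.foldl] using ih (if x < t then 1 else 0) y

-- the paired single pass computes both of A's separate scans
theorem pair_foldl (c h : Int) (xs : List Int) (p : Int × Int) :
    xs.foldl (fun (p : Int × Int) volume =>
        ((if volume > c then 1 else p.1), (if volume > h then 1 else p.2))) p
      = (xs.foldl (fun s volume => if volume > c then (1 : Int) else s) p.1,
         xs.foldl (fun s volume => if volume > h then (1 : Int) else s) p.2) := by
  induction xs generalizing p with
  | nil => simp [List.foldl]
  | cons y ys ih => simp [List.foldl, ih]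

-- ===== VERDICT (by name: the statement is the Claim_ definition above) =====
theorem check_traffic_conditions_spec : Claim_equal_check_traffic_conditions := by
  intro gt config _ _
  unfold Spec_check_traffic_conditions check_traffic_conditions check_traffic_conditions_alt
  cases gt with
  | nil => simp
  | cons x xs =>
    simp only [reduceCtorEq, if_false]
    rw [low_foldl_last, pair_foldl, PySem.List.pyGet?_neg_one, List.getLast?_eq_getLast_of_ne_nil (List.cons_ne_nil x xs)]
    simp
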